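-- pv_equiv track=rewrite | github.com/facebook/openbmc | common/recipes-core/psu-update/files/modbus_update_helper.py | get_pmm_addr
-- ===== SOURCE A (Python) =====
-- def get_pmm_addr(addr):
--     pmm_addrs = {
--         0x10: [[0x30, 0x35]],
--         0x11: [[0x3A, 0x3F]],
--         0x12: [[0x5A, 0x5F]],
--         0x13: [[0x6A, 0x6F]],
--         0x14: [[0x70, 0x75]],
--         0x15: [[0x7A, 0x7F]],
--         0x16: [[0x80, 0x85]],
--         0x17: [[0x36, 0x39], [0x46, 0x47]],
--         0x18: [[0x56, 0x58], [0x66, 0x68]],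
--         0x19: [[0x76, 0x78], [0x87, 0x88]],
--         0x1A: [[0x8A, 0x8F]],
--         0x20: [[0x90, 0x95]],
--         0x21: [[0x9A, 0x9F]],
--         0x22: [[0xAA, 0xAF]],
--         0x23: [[0xBA, 0xBF]],
--         0x24: [[0xD0, 0xD5]],
--         0x25: [[0xDA, 0xDF]],
--         0x26: [[0xE0, 0xE5]],
--         0x27: [[0x96, 0x98], [0xA7, 0xA9]],
--         0x28: [[0xB0, 0xB3], [0xB7, 0xB9]],
--         0x29: [[0xE6, 0xE7], [0xF6, 0xF9]],
--         0x2A: [[0xFA, 0xFF]],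
--     }
--     for pmm_addr, addr_ranges in pmm_addrs.items():
--         for addr_range in addr_ranges:
--             if addr >= addr_range[0] and addr <= addr_range[1]:
--                 return pmm_addr
--     return None
-- ===== SOURCE B (Python) =====
-- # B: flat (lo, hi, pmm) table sorted by lo + hand-written binary search,
-- # instead of A's linear scan over a dict of range lists.
--
-- _TABLE = [
--     (0x30, 0x35, 0x10), (0x36, 0x39, 0x17), (0x3A, 0x3F, 0x11),
--     (0x46, 0x47, 0x17), (0x56, 0x58, 0x18), (0x5A, 0x5F, 0x12),
--     (0x66, 0x68, 0x18), (0x6A, 0x6F, 0x13), (0x70, 0x75, 0x14),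
--     (0x76, 0x78, 0x19), (0x7A, 0x7F, 0x15), (0x80, 0x85, 0x16),
--     (0x87, 0x88, 0x19), (0x8A, 0x8F, 0x1A), (0x90, 0x95, 0x20),
--     (0x96, 0x98, 0x27), (0x9A, 0x9F, 0x21), (0xA7, 0xA9, 0x27),
--     (0xAA, 0xAF, 0x22), (0xB0, 0xB3, 0x28), (0xB7, 0xB9, 0x28),
--     (0xBA, 0xBF, 0x23), (0xD0, 0xD5, 0x24), (0xDA, 0xDF, 0x25),
--     (0xE0, 0xE5, 0x26), (0xE6, 0xE7, 0x29), (0xF6, 0xF9, 0x29),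
--     (0xFA, 0xFF, 0x2A),
-- ]
--
--
-- def get_pmm_addr(addr):
--     # binary search for the rightmost entry with lo <= addr
--     i, j = 0, len(_TABLE)
--     while i < j:
--         mid = (i + j) // 2
--         if _TABLE[mid][0] <= addr:
--             i = mid + 1
--         else:
--             j = mid
--     if i:
--         lo, hi, pmm = _TABLE[i - 1]
--         if addr <= hi:
--             return pmm
--     return None
-- ===== Notes on version B (the rewrite author's own statement) =====
-- stated objective: alternative
-- what changed: Replaced the linear scan over a dict of per-PMM range lists by a single flat (lo,hi,pmm) table sorted by lo with a hand-written binary search locating the unique candidate interval.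
import Mathlib
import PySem

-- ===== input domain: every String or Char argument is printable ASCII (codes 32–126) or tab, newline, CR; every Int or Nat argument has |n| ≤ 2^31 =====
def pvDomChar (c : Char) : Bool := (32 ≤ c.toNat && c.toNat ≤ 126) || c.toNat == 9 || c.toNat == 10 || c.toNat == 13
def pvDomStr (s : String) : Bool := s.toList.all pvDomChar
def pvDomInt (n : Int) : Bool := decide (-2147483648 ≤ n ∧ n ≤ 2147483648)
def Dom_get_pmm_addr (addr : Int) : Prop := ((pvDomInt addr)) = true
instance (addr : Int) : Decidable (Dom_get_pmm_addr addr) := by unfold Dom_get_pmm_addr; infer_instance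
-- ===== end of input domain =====

-- B replaces A's linear scan of a dict of range lists by binary search over one flat sorted table (objective: alternative).

-- ===== PORT A =====
-- inner loop: first range [lo, hi] of this pmm entry containing addr returns pmm
def pvGoInner (addr pmm : Int) : List (Int × Int) → Option Int
  | [] => none
  | r :: rest => if addr ≥ r.1 ∧ addr ≤ r.2 then some pmm else pvGoInner addr pmm rest

-- outer loop over the dict's (pmm, ranges) items in insertion order
def pvGoA (addr : Int) : List (Int × List (Int × Int)) → Option Int
  | [] => none
  | (pmm, ranges) :: rest =>
    match pvGoInner addr pmm ranges with
    | some v => some v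
    | none => pvGoA addr rest

def get_pmm_addr (addr : Int) : Option Int :=
  pvGoA addr
    [ (0x10, [(0x30, 0x35)]), (0x11, [(0x3A, 0x3F)]), (0x12, [(0x5A, 0x5F)]),
      (0x13, [(0x6A, 0x6F)]), (0x14, [(0x70, 0x75)]), (0x15, [(0x7A, 0x7F)]),
      (0x16, [(0x80, 0x85)]), (0x17, [(0x36, 0x39), (0x46, 0x47)]),
      (0x18, [(0x56, 0x58), (0x66, 0x68)]), (0x19, [(0x76, 0x78), (0x87, 0x88)]),
      (0x1A, [(0x8A, 0x8F)]), (0x20, [(0x90, 0x95)]), (0x21, [(0x9A, 0x9F)]),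
      (0x22, [(0xAA, 0xAF)]), (0x23, [(0xBA, 0xBF)]), (0x24, [(0xD0, 0xD5)]),
      (0x25, [(0xDA, 0xDF)]), (0x26, [(0xE0, 0xE5)]),
      (0x27, [(0x96, 0x98), (0xA7, 0xA9)]), (0x28, [(0xB0, 0xB3), (0xB7, 0xB9)]),
      (0x29, [(0xE6, 0xE7), (0xF6, 0xF9)]), (0x2A, [(0xFA, 0xFF)]) ]

-- ===== PORT B =====
-- flat table of (lo, hi, pmm), sorted by lo (same data as Source B's _TABLE)
def pvTable : List (Int × Int × Int) :=
  [ (0x30, 0x35, 0x10), (0x36, 0x39, 0x17), (0x3A, 0x3F, 0x11),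
    (0x46, 0x47, 0x17), (0x56, 0x58, 0x18), (0x5A, 0x5F, 0x12),
    (0x66, 0x68, 0x18), (0x6A, 0x6F, 0x13), (0x70, 0x75, 0x14),
    (0x76, 0x78, 0x19), (0x7A, 0x7F, 0x15), (0x80, 0x85, 0x16),
    (0x87, 0x88, 0x19), (0x8A, 0x8F, 0x1A), (0x90, 0x95, 0x20),
    (0x96, 0x98, 0x27), (0x9A, 0x9F, 0x21), (0xA7, 0xA9, 0x27),
    (0xAA, 0xAF, 0x22), (0xB0, 0xB3, 0x28), (0xB7, 0xB9, 0x28),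
    (0xBA, 0xBF, 0x23), (0xD0, 0xD5, 0x24), (0xDA, 0xDF, 0x25),
    (0xE0, 0xE5, 0x26), (0xE6, 0xE7, 0x29), (0xF6, 0xF9, 0x29),
    (0xFA, 0xFF, 0x2A) ]

-- Source B's while-loop, with a fuel argument (≥ iteration count) to make it structural
def pvBsearch (addr : Int) : Nat → Nat → Nat → Nat
  | 0, i, _ => i
  | fuel + 1, i, j =>
    if i < j then
      let mid := (i + j) / 2
      if (pvTable.getD mid (0, 0, 0)).1 ≤ addr then pvBsearch addr fuel (mid + 1) j
      else pvBsearch addr fuel i mid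
    else i

def get_pmm_addr_alt (addr : Int) : Option Int :=
  let i := pvBsearch addr pvTable.length 0 pvTable.length
  if i ≠ 0 then
    let e := pvTable.getD (i - 1) (0, 0, 0)
    if addr ≤ e.2.1 then some e.2.2 else none
  else none

-- ===== PRECONDITION & SPEC =====
def Spec_get_pmm_addr (addr : Int) (out : Option Int) : Prop := out = get_pmm_addr_alt addr
instance (addr : Int) (out : Option Int) : Decidable (Spec_get_pmm_addr addr out) := by unfold Spec_get_pmm_addr; infer_instance

-- ===== CLAIM (what is proved, stated in full; the proofs are below) =====
def Claim_equal_get_pmm_addr : Prop := ∀ (addr : Int), Dom_get_pmm_addr addr → Spec_get_pmm_addr addr (get_pmm_addr addr)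

-- ===== LEMMAS AND PROOFS =====
set_option maxHeartbeats 1600000
set_option maxRecDepth 8000

lemma a_out_of_range (addr : Int) (h : addr < 0x30 ∨ 0xFF < addr) :
    get_pmm_addr addr = none := by
  unfold get_pmm_addr
  simp only [pvGoA, pvGoInner]
  split_ifs <;> first | rfl | omega

lemma table_len : pvTable.length = 28 := by rfl

lemma bsearch_low (addr : Int) (h : addr < 0x30) : pvBsearch addr 28 0 28 = 0 := by
  simp [pvBsearch, pvTable]
  split_ifs <;> omega

lemma b_low (addr : Int) (h : addr < 0x30) : get_pmm_addr_alt addr = none := by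
  unfold get_pmm_addr_alt
  rw [table_len, bsearch_low addr h]
  simp

lemma bsearch_high (addr : Int) (h : 0xFF < addr) : pvBsearch addr 28 0 28 = 28 := by
  simp [pvBsearch, pvTable]
  split_ifs <;> omega

lemma b_high (addr : Int) (h : 0xFF < addr) : get_pmm_addr_alt addr = none := by
  unfold get_pmm_addr_alt
  rw [table_len, bsearch_high addr h]
  simp [pvTable]
  omega

-- ===== VERDICT (by name: the statement is the Claim_ definition above) =====
theorem get_pmm_addr_spec : Claim_equal_get_pmm_addr := by
  intro addr _
  unfold Spec_get_pmm_addr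
  rcases Int.lt_or_le addr 0x30 with h | h
  · rw [a_out_of_range addr (Or.inl h), b_low addr h]
  rcases Int.lt_or_le 0xFF addr with h' | h'
  · rw [a_out_of_range addr (Or.inr h'), b_high addr h']
  have key : ∀ n : Nat, n < 208 →
      get_pmm_addr (48 + (n : Int)) = get_pmm_addr_alt (48 + (n : Int)) := by decide
  have hn : addr = 48 + ((addr - 48).toNat : Int) := by omega
  rw [hn]
  exact key (addr - 48).toNat (by omega)
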